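-- pv_equiv track=rewrite | github.com/gt-files/21BJ | PYY.py | process_results_for_stand_like
-- ===== SOURCE A (Python) =====
-- BLACKJACK = 21
--
-- def process_results_for_stand_like(player_t, dealer_totals_list, is_soft):
--     """
--     Utility to compare a standing player's total vs. many dealer totals.
--     Returns the sum of +1 win / -1 loss for the entire list.
--     """
--     if player_t > BLACKJACK:
--         return -1 * len(dealer_totals_list)
--
--     chunk_ev = 0
--     for d_total in dealer_totals_list:
--         if d_total > BLACKJACK:
--             chunk_ev += 1
--         else:
--             # Soft hand: check whether using Ace as 1 or 11 is better
--             if is_soft: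
--                 soft_total = player_t + 10 if player_t <= 11 else player_t
--                 if max(soft_total, player_t) > d_total:
--                     chunk_ev += 1
--                 elif max(soft_total, player_t) < d_total:
--                     chunk_ev -= 1
--             else:
--                 if player_t > d_total:
--                     chunk_ev += 1
--                 elif player_t < d_total:
--                     chunk_ev -= 1
--     return chunk_ev
-- ===== SOURCE B (Python) =====
-- BLACKJACK = 21
--
-- def process_results_for_stand_like(player_t, dealer_totals_list, is_soft):
--     if player_t > BLACKJACK:
--         return -len(dealer_totals_list)
--     eff = player_t + 10 if (is_soft and player_t <= 11) else player_t
--     busts = sum(1 for d in dealer_totals_list if d > BLACKJACK)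
--     wins = sum(1 for d in dealer_totals_list if d <= BLACKJACK and eff > d)
--     losses = sum(1 for d in dealer_totals_list if d <= BLACKJACK and eff < d)
--     return busts + wins - losses
-- ===== Notes on version B (the rewrite author's own statement) =====
-- stated objective: simpler
-- what changed: Replaces the per-element branching accumulator with one effective total computed once and three counts (dealer busts, wins, losses) combined arithmetically.
import Mathlib
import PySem

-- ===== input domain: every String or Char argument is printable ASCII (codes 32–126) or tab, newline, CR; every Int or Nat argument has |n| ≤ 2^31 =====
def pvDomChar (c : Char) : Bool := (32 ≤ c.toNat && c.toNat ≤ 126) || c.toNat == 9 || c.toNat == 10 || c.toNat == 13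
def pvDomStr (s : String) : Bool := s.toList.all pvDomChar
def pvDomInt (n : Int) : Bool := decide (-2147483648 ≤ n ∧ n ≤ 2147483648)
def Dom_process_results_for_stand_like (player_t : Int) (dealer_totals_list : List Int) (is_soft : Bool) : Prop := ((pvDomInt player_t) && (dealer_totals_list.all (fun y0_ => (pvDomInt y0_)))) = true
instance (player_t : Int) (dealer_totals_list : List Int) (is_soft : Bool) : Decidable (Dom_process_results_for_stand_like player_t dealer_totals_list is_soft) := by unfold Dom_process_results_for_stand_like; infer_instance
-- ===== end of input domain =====

-- B computes one effective total and three counts (busts, wins, losses) instead of A's branching accumulator; objective: simpler.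


-- ===== PORT A =====
def process_results_for_stand_like (player_t : Int) (dealer_totals_list : List Int) (is_soft : Bool) : Int :=
  if player_t > 21 then
    -1 * (dealer_totals_list.length : Int)
  else
    dealer_totals_list.foldl (fun chunk_ev d_total =>
      if d_total > 21 then
        chunk_ev + 1
      else
        if is_soft then
          let soft_total := if player_t ≤ 11 then player_t + 10 else player_t
          if max soft_total player_t > d_total then chunk_ev + 1
          else if max soft_total player_t < d_total then chunk_ev - 1
          else chunk_ev
        else
          if player_t > d_total then chunk_ev + 1
          else if player_t < d_total then chunk_ev - 1
          else chunk_ev) 0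

-- ===== PORT B =====
def process_results_for_stand_like_alt (player_t : Int) (dealer_totals_list : List Int) (is_soft : Bool) : Int :=
  if player_t > 21 then
    -(dealer_totals_list.length : Int)
  else
    let eff := if is_soft && decide (player_t ≤ 11) then player_t + 10 else player_t
    let busts := (dealer_totals_list.countP (fun d => decide (d > 21)) : Int)
    let wins := (dealer_totals_list.countP (fun d => decide (d ≤ 21) && decide (eff > d)) : Int)
    let losses := (dealer_totals_list.countP (fun d => decide (d ≤ 21) && decide (eff < d)) : Int)
    busts + wins - losses

-- ===== PRECONDITION & SPEC =====
def Spec_process_results_for_stand_like (player_t : Int) (dealer_totals_list : List Int) (is_soft : Bool) (out : Int) : Prop := out = process_results_for_stand_like_alt player_t dealer_totals_list is_soft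
instance (player_t : Int) (dealer_totals_list : List Int) (is_soft : Bool) (out : Int) : Decidable (Spec_process_results_for_stand_like player_t dealer_totals_list is_soft out) := by unfold Spec_process_results_for_stand_like; infer_instance

-- ===== CLAIM (what is proved, stated in full; the proofs are below) =====
def Claim_equal_process_results_for_stand_like : Prop := ∀ (player_t : Int) (dealer_totals_list : List Int) (is_soft : Bool), Dom_process_results_for_stand_like player_t dealer_totals_list is_soft → Spec_process_results_for_stand_like player_t dealer_totals_list is_soft (process_results_for_stand_like player_t dealer_totals_list is_soft)

-- ===== LEMMAS AND PROOFS =====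

-- A's loop starting from any accumulator c equals c + busts + wins - losses (B's counts).
theorem pv_loop (player_t : Int) (is_soft : Bool) (eff : Int)
    (heff : eff = if is_soft && decide (player_t ≤ 11) then player_t + 10 else player_t)
    (l : List Int) (c : Int) :
    l.foldl (fun chunk_ev d_total =>
      if d_total > 21 then
        chunk_ev + 1
      else
        if is_soft then
          let soft_total := if player_t ≤ 11 then player_t + 10 else player_t
          if max soft_total player_t > d_total then chunk_ev + 1
          else if max soft_total player_t < d_total then chunk_ev - 1
          else chunk_ev
        else
          if player_t > d_total then chunk_ev + 1
          else if player_t < d_total then chunk_ev - 1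
          else chunk_ev) c
      = c + (l.countP (fun d => decide (d > 21)) : Int)
          + (l.countP (fun d => decide (d ≤ 21) && decide (eff > d)) : Int)
          - (l.countP (fun d => decide (d ≤ 21) && decide (eff < d)) : Int) := by
  induction l generalizing c with
  | nil => simp
  | cons x xs ih =>
    simp only [List.foldl_cons, List.countP_cons, ih]
    subst heff
    cases is_soft <;> simp <;> split_ifs <;> omega

-- ===== VERDICT (by name: the statement is the Claim_ definition above) =====
theorem process_results_for_stand_like_spec : Claim_equal_process_results_for_stand_like := by
  intro p l s _
  unfold Spec_process_results_for_stand_like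
  unfold process_results_for_stand_like process_results_for_stand_like_alt
  by_cases h : p > 21
  · simp [if_pos h]
  · simp only [if_neg h]
    rw [pv_loop p s _ rfl l 0]
    ring
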